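-- pv_equiv track=rewrite | github.com/ThomasKarpinski/Matura | matura2012_PR_Python/zad2_liczbyosiągalne.py | zad2_c
-- ===== SOURCE A (Python) =====
-- def zad2_c(n):
--     """
--     sprawdza czy liczba n jest osiągalna spełniając warunek n=k+s(k)
--     :param n: liczba naturalna
--     """
--     if 1000 <= n <= 9999:
--         for s in range(4, 33):
--             k = n - s
--             suma = k % 10 + (k // 10) % 10 + (k // 100) % 10 + (k // 1000) % 10
--             if suma == s:
--                 return k
--     return 0
-- ===== SOURCE B (Python) =====
-- def digit_sum(k):
--     s = 0
--     while k > 0: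
--         s += k % 10
--         k //= 10
--     return s
--
--
-- def zad2_c(n):
--     if not (1000 <= n <= 9999):
--         return 0
--     # k + digit_sum(k) = n forces 2k == n (mod 9), i.e. k == 5n (mod 9),
--     # so only every ninth value in [n-32, n-4] can be an answer:
--     # start at the largest such k and step down by 9 (at most 4 checks).
--     k = n - 4 - ((n - 4 - 5 * n) % 9)
--     while k >= n - 32:
--         if k + digit_sum(k) == n:
--             return k
--         k -= 9
--     return 0
-- ===== Notes on version B (the rewrite author's own statement) =====
-- stated objective: alternative
-- what changed: B uses the number-theoretic fact that a digit sum is congruent to its number modulo nine, so k + digit_sum(k) = n pins down k's residue class: instead of A's scan over all twenty-nine digit-sum guesses s, B steps k down in strides of nine from the largest congruent candidate, testing at most four candidates with a while-loop digit sum.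
import Mathlib
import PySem

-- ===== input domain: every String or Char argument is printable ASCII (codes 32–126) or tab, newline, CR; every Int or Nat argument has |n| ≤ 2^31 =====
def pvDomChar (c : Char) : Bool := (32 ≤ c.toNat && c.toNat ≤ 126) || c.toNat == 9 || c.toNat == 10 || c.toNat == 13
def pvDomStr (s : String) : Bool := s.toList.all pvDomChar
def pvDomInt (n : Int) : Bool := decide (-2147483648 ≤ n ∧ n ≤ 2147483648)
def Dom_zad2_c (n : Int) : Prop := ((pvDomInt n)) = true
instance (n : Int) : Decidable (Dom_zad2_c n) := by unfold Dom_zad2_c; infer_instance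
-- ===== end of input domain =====

-- B filters candidates with the mod-9 invariant digit_sum(k) ≡ k (mod 9): only
-- k ≡ 5n (mod 9) can satisfy k + digit_sum(k) = n, so B steps down by 9 from the
-- largest congruent k ≤ n-4 (≤ 4 checks) instead of A's scan over s = 4..32.

-- ===== PORT A =====
-- A's 'for s in range(4, 33)' loop: first s whose reconstructed k matches
def zad2_cLoopA (n : Int) : List Int → Option Int
  | [] => none
  | s :: rest =>
      let k := n - s
      let suma := PySem.Int.mod k 10 + PySem.Int.mod (PySem.Int.floordiv k 10) 10
        + PySem.Int.mod (PySem.Int.floordiv k 100) 10 + PySem.Int.mod (PySem.Int.floordiv k 1000) 10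
      if suma = s then some k else zad2_cLoopA n rest

def zad2_c (n : Int) : Int :=
  if 1000 ≤ n ∧ n ≤ 9999 then
    (zad2_cLoopA n (PySem.List.pyRange 4 33 1)).getD 0
  else 0

-- ===== PORT B =====
-- B's helper digit_sum: 'while k > 0: s += k % 10; k //= 10'
def digitSum (k : Int) : Int :=
  if h : 0 < k then
    PySem.Int.mod k 10 + digitSum (PySem.Int.floordiv k 10)
  else 0
termination_by k.toNat
decreasing_by
  have h10 : PySem.Int.floordiv k 10 = k / 10 := PySem.Int.floordiv_eq_ediv_of_pos (by omega)
  rw [h10]; omega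

-- B's 'while k >= n - 32' loop, stepping k down by 9
def zad2_cWhileB (n k : Int) : Int :=
  if h : n - 32 ≤ k then
    if k + digitSum k = n then k else zad2_cWhileB n (k - 9)
  else 0
termination_by (k - n + 42).toNat
decreasing_by omega

def zad2_c_alt (n : Int) : Int :=
  if 1000 ≤ n ∧ n ≤ 9999 then
    zad2_cWhileB n (n - 4 - PySem.Int.mod (n - 4 - 5 * n) 9)
  else 0

-- ===== PRECONDITION & SPEC =====
def Spec_zad2_c (n : Int) (out : Int) : Prop := out = zad2_c_alt n
instance (n : Int) (out : Int) : Decidable (Spec_zad2_c n out) := by unfold Spec_zad2_c; infer_instance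

-- ===== CLAIM (what is proved, stated in full; the proofs are below) =====
def Claim_equal_zad2_c : Prop := ∀ (n : Int), Dom_zad2_c n → Spec_zad2_c n (zad2_c n)

-- ===== LEMMAS AND PROOFS =====

theorem digitSum_zero : digitSum 0 = 0 := by rw [digitSum]; norm_num

theorem digitSum_step (k : Int) (hk : 0 ≤ k) : digitSum k = k % 10 + digitSum (k / 10) := by
  rcases lt_or_eq_of_le hk with h | h
  · rw [digitSum]
    simp only [h, dite_true]
    rw [PySem.Int.floordiv_eq_ediv_of_pos (by omega : (0:Int) < 10),
        PySem.Int.mod_eq_emod_of_pos (by omega : (0:Int) < 10)]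
  · rw [← h, digitSum_zero]
    norm_num [digitSum_zero]

theorem digitSum_closed (k : Int) (h0 : 0 ≤ k) (h1 : k < 10000) :
    digitSum k = k % 10 + (k / 10) % 10 + (k / 100) % 10 + (k / 1000) % 10 := by
  have e1 : k / 10 / 10 = k / 100 := by omega
  have e2 : k / 100 / 10 = k / 1000 := by omega
  have e3 : k / 1000 / 10 = 0 := by omega
  rw [digitSum_step k h0,
      digitSum_step (k / 10) (by omega),
      digitSum_step (k / 10 / 10) (by omega),
      e1,
      digitSum_step (k / 100 / 10) (by omega),
      e2, e3, digitSum_zero]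
  ring

-- digit sums are ≡ the number mod 9 (four-digit closed form)
theorem dsum4_mod9 (k : Int) (h0 : 0 ≤ k) (h1 : k < 10000) :
    (k % 10 + (k / 10) % 10 + (k / 100) % 10 + (k / 1000) % 10 - k) % 9 = 0 := by
  have h : k % 10 + (k / 10) % 10 + (k / 100) % 10 + (k / 1000) % 10 - k
      = 9 * (-((k / 10) % 10) - 11 * ((k / 100) % 10) - 111 * ((k / 1000) % 10)) := by omega
  omega

-- unfold A's loop body at a head s with n - s in [0, 10000)
theorem loopA_cons (n s : Int) (rest : List Int) (h0 : 0 ≤ n - s) (h1 : n - s < 10000) :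
    zad2_cLoopA n (s :: rest)
      = if (n - s) % 10 + ((n - s) / 10) % 10 + ((n - s) / 100) % 10 + ((n - s) / 1000) % 10 = s
        then some (n - s) else zad2_cLoopA n rest := by
  simp only [zad2_cLoopA]
  rw [PySem.Int.floordiv_eq_ediv_of_pos (by omega : (0:Int) < 10),
      PySem.Int.floordiv_eq_ediv_of_pos (by omega : (0:Int) < 100),
      PySem.Int.floordiv_eq_ediv_of_pos (by omega : (0:Int) < 1000)]
  simp only [PySem.Int.mod_eq_emod_of_pos (by omega : (0:Int) < 10)]

-- core: A's scan from s = a equals B's while loop from the next congruent k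
theorem loops_eq (n : Int) (hn1 : 1000 ≤ n) (hn2 : n ≤ 9999) :
    ∀ (m : Nat) (a k : Int), a = 33 - (m : Int) → 4 ≤ a → a ≤ n - k → n - k < a + 9 →
      (2 * (n - k) - n) % 9 = 0 →
      (zad2_cLoopA n (PySem.List.pyRange a 33 1)).getD 0 = zad2_cWhileB n k := by
  intro m
  induction m with
  | zero =>
      intro a k ha h4 hk1 hk2 hc
      have ha' : a = 33 := by omega
      subst ha'
      rw [PySem.List.pyRange_one]
      have : ((33:Int) - 33).toNat = 0 := by omega
      rw [this]
      simp only [List.range_zero, List.map_nil, zad2_cLoopA, Option.getD_none]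
      rw [zad2_cWhileB.eq_def]
      have : ¬ (n - 32 ≤ k) := by omega
      simp [this]
  | succ m ih =>
      intro a k ha h4 hk1 hk2 hc
      have halt : a < 33 := by omega
      rw [PySem.List.pyRange_one_cons (by omega)]
      by_cases hak : a = n - k
      · -- a is the congruent candidate; both loops test the same condition
        have hk0 : 0 ≤ n - a := by omega
        have hk10 : n - a < 10000 := by omega
        rw [loopA_cons n a _ hk0 hk10]
        rw [zad2_cWhileB.eq_def]
        have hge : n - 32 ≤ k := by omega
        simp only [hge, dite_true]
        have hkk : k = n - a := by omega
        have hcond : (k + digitSum k = n) ↔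
            ((n - a) % 10 + ((n - a) / 10) % 10 + ((n - a) / 100) % 10 + ((n - a) / 1000) % 10 = a) := by
          rw [hkk, digitSum_closed (n - a) hk0 hk10]
          constructor <;> intro h <;> omega
        by_cases h : (n - a) % 10 + ((n - a) / 10) % 10 + ((n - a) / 100) % 10 + ((n - a) / 1000) % 10 = a
        · rw [if_pos h, if_pos (hcond.mpr h), Option.getD_some, hkk]
        · rw [if_neg h, if_neg (fun hc' => h (hcond.mp hc'))]
          exact ih (a + 1) (k - 9) (by omega) (by omega) (by omega) (by omega) (by omega)
      · -- a is not congruent to 5n mod 9, so A's test at a must fail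
        have hk0 : 0 ≤ n - a := by omega
        have hk10 : n - a < 10000 := by omega
        rw [loopA_cons n a _ hk0 hk10]
        have hfail : ¬ ((n - a) % 10 + ((n - a) / 10) % 10 + ((n - a) / 100) % 10 + ((n - a) / 1000) % 10 = a) := by
          intro h
          have h9 := dsum4_mod9 (n - a) hk0 hk10
          omega
        rw [if_neg hfail]
        exact ih (a + 1) k (by omega) (by omega) (by omega) (by omega) hc

-- ===== VERDICT (by name: the statement is the Claim_ definition above) =====
theorem zad2_c_spec : Claim_equal_zad2_c := by
  intro n _
  unfold Spec_zad2_c zad2_c zad2_c_alt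
  by_cases h : 1000 ≤ n ∧ n ≤ 9999
  · simp only [if_pos h]
    rw [PySem.Int.mod_eq_emod_of_pos (by omega : (0:Int) < 9)]
    set k0 := n - 4 - (n - 4 - 5 * n) % 9 with hk0
    have hm0 : 0 ≤ (n - 4 - 5 * n) % 9 := Int.emod_nonneg _ (by omega)
    have hm9 : (n - 4 - 5 * n) % 9 < 9 := Int.emod_lt_of_pos _ (by omega)
    exact loops_eq n h.1 h.2 29 4 k0 (by omega) (by omega) (by omega) (by omega) (by omega)
  · simp [if_neg h]
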